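-- pv_equiv track=rewrite | github.com/F0d0s/PVA | ULOHY/ULOHA6/main.py | find_item_in_shelves
-- ===== SOURCE A (Python) =====
-- def find_item_in_shelves(shelves, item):
--     for shelf_id, items in shelves.items():
--         for shelf_item in items:
--             if item.lower() == shelf_item.lower():
--                 return (shelf_id, shelf_item)
--     for shelf_id, items in shelves.items():
--         for shelf_item in items:
--             if item.lower() in shelf_item.lower():
--                 return (shelf_id, shelf_item)
--     return None
-- ===== SOURCE B (Python) =====
-- def find_item_in_shelves(shelves, item):
--     needle = item.lower()
--     candidate = None
--     for shelf_id, items in shelves.items():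
--         for shelf_item in items:
--             low = shelf_item.lower()
--             if needle == low:
--                 return (shelf_id, shelf_item)
--             if candidate is None and needle in low:
--                 candidate = (shelf_id, shelf_item)
--     return candidate
-- ===== Notes on version B (the rewrite author's own statement) =====
-- stated objective: faster
-- what changed: Replaces A's two priority-ordered full traversals (exact pass, then substring pass) with one single traversal that returns on the first exact match and carries the first substring match as a fallback candidate, lowercasing the needle once instead of on every inner iteration.
import Mathlib
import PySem

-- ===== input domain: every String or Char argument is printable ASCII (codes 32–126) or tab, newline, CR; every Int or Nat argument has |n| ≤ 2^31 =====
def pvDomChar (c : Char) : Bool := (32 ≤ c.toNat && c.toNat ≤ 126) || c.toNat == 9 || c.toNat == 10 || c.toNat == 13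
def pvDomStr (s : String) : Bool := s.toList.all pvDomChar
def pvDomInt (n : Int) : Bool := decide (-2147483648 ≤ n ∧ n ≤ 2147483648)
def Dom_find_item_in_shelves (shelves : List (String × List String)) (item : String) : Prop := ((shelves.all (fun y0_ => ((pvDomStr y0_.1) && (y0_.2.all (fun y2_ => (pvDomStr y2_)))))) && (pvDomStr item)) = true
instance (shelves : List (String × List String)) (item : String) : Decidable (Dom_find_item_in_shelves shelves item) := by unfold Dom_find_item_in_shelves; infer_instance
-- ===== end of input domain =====

-- B replaces A's two priority-ordered passes (exact, then substring) with one pass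
-- that returns on the first exact match and carries the first substring match as fallback.

-- ===== PORT A =====
-- first loop of A: first exact (case-insensitive) match, with early return
def pvPassExact (item : String) : List (String × List String) → Option (String × String)
  | [] => none
  | (sid, items) :: rest =>
    match items.find? (fun si => PySem.Str.lower item == PySem.Str.lower si) with
    | some si => some (sid, si)
    | none => pvPassExact item rest

-- second loop of A: first substring (case-insensitive) match, with early return
def pvPassSub (item : String) : List (String × List String) → Option (String × String)
  | [] => none
  | (sid, items) :: rest =>
    match items.find? (fun si => PySem.Str.isIn (PySem.Str.lower item) (PySem.Str.lower si)) with
    | some si => some (sid, si)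
    | none => pvPassSub item rest

def find_item_in_shelves (shelves : List (String × List String)) (item : String) : Option (String × String) :=
  match pvPassExact item shelves with
  | some r => some r
  | none => pvPassSub item shelves

-- ===== PORT B =====
-- inner item loop of B: .inl = early return on exact match, .inr = updated candidate
def pvAltItems (needle sid : String) : List String → Option (String × String) → Sum (String × String) (Option (String × String))
  | [], cand => .inr cand
  | si :: rest, cand =>
    let low := PySem.Str.lower si
    if needle == low then .inl (sid, si)
    else pvAltItems needle sid rest
      (if cand.isNone && PySem.Str.isIn needle low then some (sid, si) else cand)

def pvAltGo (needle : String) : List (String × List String) → Option (String × String) → Option (String × String)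
  | [], cand => cand
  | (sid, items) :: rest, cand =>
    match pvAltItems needle sid items cand with
    | .inl r => some r
    | .inr cand' => pvAltGo needle rest cand'

def find_item_in_shelves_alt (shelves : List (String × List String)) (item : String) : Option (String × String) :=
  pvAltGo (PySem.Str.lower item) shelves none

-- ===== PRECONDITION & SPEC =====
def Spec_find_item_in_shelves (shelves : List (String × List String)) (item : String) (out : Option (String × String)) : Prop := out = find_item_in_shelves_alt shelves item
instance (shelves : List (String × List String)) (item : String) (out : Option (String × String)) : Decidable (Spec_find_item_in_shelves shelves item out) := by unfold Spec_find_item_in_shelves; infer_instance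

-- ===== CLAIM (what is proved, stated in full; the proofs are below) =====
def Claim_equal_find_item_in_shelves : Prop := ∀ (shelves : List (String × List String)) (item : String), Dom_find_item_in_shelves shelves item → Spec_find_item_in_shelves shelves item (find_item_in_shelves shelves item)

-- ===== LEMMAS AND PROOFS =====

-- characterisation of B's inner loop by A's two per-shelf scans
theorem pvAltItems_eq (item sid : String) (items : List String)
    (cand : Option (String × String)) :
    pvAltItems (PySem.Str.lower item) sid items cand =
      match items.find? (fun si => PySem.Str.lower item == PySem.Str.lower si) with
      | some si => .inl (sid, si)
      | none => .inr (match cand with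
          | some c => some c
          | none => (items.find? (fun si =>
              PySem.Str.isIn (PySem.Str.lower item) (PySem.Str.lower si))).map
                (fun si => (sid, si))) := by
  induction items generalizing cand with
  | nil => cases cand <;> simp [pvAltItems]
  | cons si rest ih =>
    simp only [pvAltItems, List.find?]
    by_cases hx : (PySem.Str.lower item == PySem.Str.lower si) = true
    · simp [hx]
    · simp only [hx, Bool.false_eq_true, if_false, ih]
      cases cand with
      | some c => simp
      | none =>
        by_cases hs : PySem.Str.isIn (PySem.Str.lower item) (PySem.Str.lower si) = true
        all_goals simp only [PySem.Str.isIn_eq, PySem.Str.toList_lower] at hs ⊢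
        · simp only [hs, Option.isNone_none, Bool.true_and, if_true]
          cases rest.find? (fun si => PySem.Str.lower item == PySem.Str.lower si) <;> simp
        · simp [hs]

-- characterisation of B's outer loop by A's two passes
theorem pvAltGo_eq (item : String) (shelves : List (String × List String))
    (cand : Option (String × String)) :
    pvAltGo (PySem.Str.lower item) shelves cand =
      match pvPassExact item shelves with
      | some r => some r
      | none => (match cand with
          | some c => some c
          | none => pvPassSub item shelves) := by
  induction shelves generalizing cand with
  | nil => cases cand <;> simp [pvAltGo, pvPassExact, pvPassSub]
  | cons p rest ih =>
    obtain ⟨sid, items⟩ := p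
    simp only [pvAltGo, pvAltItems_eq, pvPassExact, pvPassSub]
    cases hx : items.find? (fun si => PySem.Str.lower item == PySem.Str.lower si) with
    | some si => simp
    | none =>
      simp only [ih]
      cases cand with
      | some c => simp
      | none =>
        cases hs : items.find? (fun si =>
            PySem.Str.isIn (PySem.Str.lower item) (PySem.Str.lower si)) with
        | some si =>
          cases pvPassExact item rest <;> simp
        | none => simp

-- ===== VERDICT (by name: the statement is the Claim_ definition above) =====
theorem find_item_in_shelves_spec : Claim_equal_find_item_in_shelves := by
  intro shelves item _
  unfold Spec_find_item_in_shelves find_item_in_shelves find_item_in_shelves_alt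
  rw [pvAltGo_eq]
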